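-- pv_equiv track=rewrite | github.com/TheDaniel166/IsopGem | src/pillars/gematria/services/els_service.py | generate_fibonacci_positions
-- ===== SOURCE A (Python) =====
-- from typing import List, Tuple, Optional
--
-- def generate_fibonacci_positions(start: int, term_len: int, max_pos: int) -> List[int]:
--     """Generate positions using cumulative Fibonacci skips: 0, 1, 2, 4, 7, 12, 20..."""
--     # Build Fibonacci sequence for skip distances
--     fib = [1, 1]
--     while len(fib) < term_len:
--         fib.append(fib[-1] + fib[-2])
--
--     # Create cumulative positions
--     positions = [start]
--     cumulative = 0
--     for i in range(1, term_len):
--         cumulative += fib[i - 1]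
--         pos = start + cumulative
--         if pos >= max_pos:
--             return []
--         positions.append(pos)
--     return positions
-- ===== SOURCE B (Python) =====
-- def generate_fibonacci_positions(start: int, term_len: int, max_pos: int) -> list:
--     """Closed-form offsets with a single end-of-run validity check.
--
--     By the Fibonacci prefix-sum identity F(1)+...+F(i) = F(i+2)-1, position i
--     (for i >= 1) is start + F(i+2) - 1.  These offsets are strictly increasing,
--     so the run contains a position >= max_pos iff its LAST position does: no
--     cumulative accumulator, no fib table, and the bound is checked once."""
--     a, b = 2, 3  # F(3), F(4) in the 1, 1, 2, 3, 5, ... indexing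
--     tail = []
--     for _ in range(term_len - 1):
--         tail.append(start + a - 1)
--         a, b = b, a + b
--     if tail and tail[-1] >= max_pos:
--         return []
--     return [start] + tail
-- ===== Notes on version B (the rewrite author's own statement) =====
-- stated objective: alternative
-- what changed: B replaces A's two-phase table-then-accumulate design by the closed-form identity F(1)+...+F(i)=F(i+2)-1 (so each position is start+F(i+2)-1 with no cumulative accumulator and no fib table) and, using that the offsets are strictly increasing, replaces A's per-step bound check with a single check of the last position.
import Mathlib
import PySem

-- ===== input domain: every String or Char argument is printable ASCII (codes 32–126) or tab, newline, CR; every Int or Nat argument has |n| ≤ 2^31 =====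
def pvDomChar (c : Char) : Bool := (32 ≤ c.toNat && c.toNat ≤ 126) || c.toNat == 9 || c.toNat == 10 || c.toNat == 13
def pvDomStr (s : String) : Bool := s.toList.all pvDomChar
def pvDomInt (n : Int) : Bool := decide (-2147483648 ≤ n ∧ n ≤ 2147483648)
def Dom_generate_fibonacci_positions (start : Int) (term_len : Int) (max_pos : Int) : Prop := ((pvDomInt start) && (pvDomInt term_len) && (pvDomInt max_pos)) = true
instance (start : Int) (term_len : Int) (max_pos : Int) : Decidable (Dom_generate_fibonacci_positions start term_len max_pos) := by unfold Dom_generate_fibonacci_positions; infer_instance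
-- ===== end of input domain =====

-- B drops A's fib table and cumulative accumulator via the prefix-sum identity
-- F(1)+…+F(i) = F(i+2)-1, and checks the bound once (the offsets increase); objective: alternative.

-- ===== PORT A =====
-- while len(fib) < term_len: fib.append(fib[-1] + fib[-2])
-- fib[-1]/fib[-2] are ported with pyGet?; the '.getD 0' default is never taken since
-- the list always has length ≥ 2 (exact on every reachable state).
def pvBuildFibA (term_len : Int) (fib : List Int) : List Int :=
  if _h : (fib.length : Int) < term_len then
    pvBuildFibA term_len (fib ++ [(PySem.List.pyGet? fib (-1)).getD 0 + (PySem.List.pyGet? fib (-2)).getD 0])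
  else fib
termination_by (term_len - fib.length).toNat
decreasing_by simp; omega

-- for i in range(1, term_len): … with the early 'return []'
def pvLoopA (fib : List Int) (start max_pos : Int) : List Int → Int → List Int → List Int
  | [], _, positions => positions
  | i :: rest, cumulative, positions =>
    let cumulative := cumulative + (PySem.List.pyGet? fib (i - 1)).getD 0
    let pos := start + cumulative
    if pos ≥ max_pos then []
    else pvLoopA fib start max_pos rest cumulative (positions ++ [pos])

def generate_fibonacci_positions (start : Int) (term_len : Int) (max_pos : Int) : List Int :=
  let fib := pvBuildFibA term_len [1, 1]
  pvLoopA fib start max_pos (PySem.List.pyRange 1 term_len 1) 0 [start]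

-- ===== PORT B =====
-- for _ in range(term_len - 1): tail.append(start + a - 1); a, b = b, a + b
def pvLoopBalt (start : Int) : Nat → Int → Int → List Int → List Int
  | 0, _, _, tail => tail
  | n + 1, a, b, tail => pvLoopBalt start n b (a + b) (tail ++ [start + a - 1])

-- 'if tail and tail[-1] >= max_pos' — tail[-1] ported via getLast? (only taken when nonempty)
def generate_fibonacci_positions_alt (start : Int) (term_len : Int) (max_pos : Int) : List Int :=
  let tail := pvLoopBalt start (term_len - 1).toNat 2 3 []
  match tail.getLast? with
  | some x => if x ≥ max_pos then [] else start :: tail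
  | none => [start]

-- ===== PRECONDITION & SPEC =====
def Spec_generate_fibonacci_positions (start : Int) (term_len : Int) (max_pos : Int) (out : List Int) : Prop := out = generate_fibonacci_positions_alt start term_len max_pos
instance (start : Int) (term_len : Int) (max_pos : Int) (out : List Int) : Decidable (Spec_generate_fibonacci_positions start term_len max_pos out) := by unfold Spec_generate_fibonacci_positions; infer_instance

-- ===== CLAIM (what is proved, stated in full; the proofs are below) =====
def Claim_equal_generate_fibonacci_positions : Prop := ∀ (start : Int) (term_len : Int) (max_pos : Int), Dom_generate_fibonacci_positions start term_len max_pos → Spec_generate_fibonacci_positions start term_len max_pos (generate_fibonacci_positions start term_len max_pos)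

-- ===== LEMMAS AND PROOFS =====

/-- The mathematical Fibonacci sequence A tabulates (1, 1, 2, 3, 5, …). -/
def pvFib : Nat → Int
  | 0 => 1
  | 1 => 1
  | n + 2 => pvFib n + pvFib (n + 1)

lemma pvFib_pos : ∀ n, 1 ≤ pvFib n
  | 0 => le_refl 1
  | 1 => le_refl 1
  | n + 2 => by rw [pvFib]; have := pvFib_pos n; have := pvFib_pos (n + 1); omega

lemma pvFib_le_succ (n : Nat) : pvFib n ≤ pvFib (n + 1) := by
  cases n with
  | zero => exact le_refl 1
  | succ m => rw [pvFib]; have := pvFib_pos m; omega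

lemma pvFib_mono : Monotone pvFib := monotone_nat_of_le_succ pvFib_le_succ

lemma pvBuildFibA_spec (t : Int) : ∀ (m : Nat), 2 ≤ m →
    pvBuildFibA t ((List.range m).map pvFib) = (List.range (max m t.toNat)).map pvFib := by
  intro m hm
  by_cases h : (m : Int) < t
  · rw [pvBuildFibA]
    have hlen : (((List.range m).map pvFib).length : Int) < t := by simpa using h
    rw [dif_pos hlen]
    have h1 : PySem.List.pyGet? ((List.range m).map pvFib) (-1) = some (pvFib (m - 1)) := by
      rw [PySem.List.pyGet?_neg_ofNat _ 1 (by omega) (by simpa using hm.trans' (by omega))]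
      simp [List.getElem?_map, List.getElem?_range (show m - 1 < m by omega)]
    have h2 : PySem.List.pyGet? ((List.range m).map pvFib) (-2) = some (pvFib (m - 2)) := by
      rw [PySem.List.pyGet?_neg_ofNat _ 2 (by omega) (by simpa using hm)]
      simp [List.getElem?_map, List.getElem?_range (show m - 2 < m by omega)]
    have happ : ((List.range m).map pvFib) ++ [(PySem.List.pyGet? ((List.range m).map pvFib) (-1)).getD 0 + (PySem.List.pyGet? ((List.range m).map pvFib) (-2)).getD 0]
        = (List.range (m + 1)).map pvFib := by
      rw [h1, h2, List.range_succ, List.map_append]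
      simp only [List.map_cons, List.map_nil]
      congr 2
      obtain ⟨k, rfl⟩ : ∃ k, m = k + 2 := ⟨m - 2, by omega⟩
      simp only [show k + 2 - 1 = k + 1 from rfl, show k + 2 - 2 = k from rfl, pvFib,
        Option.getD_some]
      ring
    rw [happ]
    have := pvBuildFibA_spec t (m + 1) (by omega)
    rw [this]
    congr 2
    omega
  · rw [pvBuildFibA]
    rw [dif_neg (by simpa using h)]
    congr 2
    omega
termination_by m => (t - m).toNat
decreasing_by omega

lemma pvFib_table_get (t : Int) (j : Int) (h0 : 0 ≤ j) (hj : j < t) :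
    (PySem.List.pyGet? (pvBuildFibA t [1, 1]) (j)).getD 0 = pvFib j.toNat := by
  have hstart : ([1, 1] : List Int) = (List.range 2).map pvFib := by decide
  rw [hstart, pvBuildFibA_spec t 2 le_rfl]
  rw [PySem.List.pyGet?_of_nonneg _ h0]
  have hjt : j.toNat < max 2 t.toNat := by omega
  simp [List.getElem?_map, List.getElem?_range hjt]

/-- Characterisation of A's loop: with the cumulative invariant `pvFib i - 1`, either
    some (hence the last) position reaches `max_pos` and the result is `[]`, or all
    positions `start + pvFib (j+1) - 1` are appended. -/
lemma pvLoopA_char (start max_pos t : Int) :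
    ∀ (n : Nat) (i : Int) (positions : List Int), 1 ≤ i → n = (t - i).toNat →
    pvLoopA (pvBuildFibA t [1, 1]) start max_pos (PySem.List.pyRange i t 1) (pvFib i.toNat - 1) positions
      = if i < t ∧ start + pvFib t.toNat - 1 ≥ max_pos then []
        else positions ++ (List.range n).map (fun k => start + pvFib (i.toNat + 1 + k) - 1) := by
  intro n
  induction n with
  | zero =>
    intro i positions hi hn
    rw [PySem.List.pyRange_one_eq_nil (by omega)]
    rw [if_neg (by omega)]
    simp [pvLoopA]
  | succ n ih =>
    intro i positions hi hn
    have hit : i < t := by omega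
    rw [PySem.List.pyRange_one_cons hit]
    show (if start + (pvFib i.toNat - 1 + (PySem.List.pyGet? (pvBuildFibA t [1, 1]) (i - 1)).getD 0) ≥ max_pos then []
      else pvLoopA (pvBuildFibA t [1, 1]) start max_pos (PySem.List.pyRange (i + 1) t 1)
        (pvFib i.toNat - 1 + (PySem.List.pyGet? (pvBuildFibA t [1, 1]) (i - 1)).getD 0)
        (positions ++ [start + (pvFib i.toNat - 1 + (PySem.List.pyGet? (pvBuildFibA t [1, 1]) (i - 1)).getD 0)])) = _
    rw [pvFib_table_get t (i - 1) (by omega) (by omega)]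
    obtain ⟨k, hk⟩ : ∃ k : Nat, i.toNat = k + 1 := ⟨i.toNat - 1, by omega⟩
    have hcum : pvFib i.toNat - 1 + pvFib (i - 1).toNat = pvFib (i.toNat + 1) - 1 := by
      have h1 : (i - 1).toNat = k := by omega
      rw [h1, hk, show k + 1 + 1 = k + 2 from rfl, pvFib]
      ring
    rw [hcum]
    have hmono : pvFib (i.toNat + 1) ≤ pvFib t.toNat := pvFib_mono (by omega)
    by_cases hge : start + (pvFib (i.toNat + 1) - 1) ≥ max_pos
    · rw [if_pos hge, if_pos ⟨hit, by omega⟩]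
    · rw [if_neg hge]
      have hrec := ih (i + 1) (positions ++ [start + (pvFib (i.toNat + 1) - 1)]) (by omega) (by omega)
      rw [show (i + 1).toNat = i.toNat + 1 by omega] at hrec
      rw [hrec]
      by_cases hcond : i < t ∧ start + pvFib t.toNat - 1 ≥ max_pos
      · have hi1t : i + 1 < t := by
          by_contra hcon
          have heq : i.toNat + 1 = t.toNat := by omega
          rw [heq] at hge
          exact hge (by omega)
        rw [if_pos ⟨hi1t, hcond.2⟩, if_pos hcond]
      · rw [if_neg (fun h => hcond ⟨hit, h.2⟩), if_neg hcond]
        rw [List.append_assoc, List.singleton_append]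
        congr 1
        rw [List.range_succ_eq_map, List.map_cons, List.map_map]
        congr 1
        · have h : i.toNat + 1 + 0 = i.toNat + 1 := by omega
          rw [h]
          omega
        · apply List.map_congr_left
          intro a _
          simp only [Function.comp_apply]
          have h : i.toNat + 1 + 1 + a = i.toNat + 1 + (a + 1) := by omega
          rw [h]

/-- Characterisation of B's loop: starting from `(pvFib (k+2), pvFib (k+3))` it appends
    the closed-form positions. -/
lemma pvLoopBalt_char (start : Int) :
    ∀ (n k : Nat) (tail : List Int),
    pvLoopBalt start n (pvFib (k + 2)) (pvFib (k + 3)) tail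
      = tail ++ (List.range n).map (fun j => start + pvFib (k + 2 + j) - 1) := by
  intro n
  induction n with
  | zero => intro k tail; simp [pvLoopBalt]
  | succ n ih =>
    intro k tail
    show pvLoopBalt start n (pvFib (k + 3)) (pvFib (k + 2) + pvFib (k + 3))
        (tail ++ [start + pvFib (k + 2) - 1]) = _
    have hb : pvFib (k + 2) + pvFib (k + 3) = pvFib (k + 1 + 3) := by
      conv_rhs => rw [show k + 1 + 3 = k + 2 + 2 by omega]
      conv_rhs => rw [pvFib]
    rw [hb, ih (k + 1)]
    rw [List.append_assoc, List.singleton_append]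
    congr 1
    rw [List.range_succ_eq_map, List.map_cons, List.map_map]
    congr 1
    apply List.map_congr_left
    intro a _
    simp only [Function.comp_apply]
    have h : k + 1 + 2 + a = k + 2 + (a + 1) := by omega
    rw [h]

-- ===== VERDICT (by name: the statement is the Claim_ definition above) =====
theorem generate_fibonacci_positions_spec : Claim_equal_generate_fibonacci_positions := by
  intro start term_len max_pos _
  unfold Spec_generate_fibonacci_positions generate_fibonacci_positions generate_fibonacci_positions_alt
  have hB : pvLoopBalt start (term_len - 1).toNat 2 3 []
      = (List.range (term_len - 1).toNat).map (fun j => start + pvFib (2 + j) - 1) := by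
    have h2 : (2 : Int) = pvFib 2 := by decide
    have h3 : (3 : Int) = pvFib 3 := by decide
    rw [h2, h3]
    simpa using pvLoopBalt_char start (term_len - 1).toNat 0 []
  have hA := pvLoopA_char start max_pos term_len (term_len - 1).toNat 1 [start] le_rfl (by omega)
  have h1 : pvFib (1 : Int).toNat - 1 = 0 := by decide
  rw [h1] at hA
  simp only []
  rw [hA, hB]
  have hred : ∀ (L : List Int) (x : Int),
      (match some x with
       | some y => if y ≥ max_pos then [] else start :: L
       | none => ([start] : List Int)) = if x ≥ max_pos then [] else start :: L := fun _ _ => rfl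
  by_cases ht : 1 < term_len
  · set N := (term_len - 1).toNat with hN
    have hNpos : 0 < N := by omega
    have hlast : ((List.range N).map (fun j => start + pvFib (2 + j) - 1)).getLast?
        = some (start + pvFib (N + 1) - 1) := by
      rw [List.getLast?_eq_getElem?]
      simp only [List.length_map, List.length_range]
      rw [List.getElem?_map, List.getElem?_range (show N - 1 < N by omega)]
      simp only [Option.map_some]
      have h : 2 + (N - 1) = N + 1 := by omega
      rw [h]
    have hN1 : N + 1 = term_len.toNat := by omega
    rw [hlast, hred, hN1]
    by_cases hx : start + pvFib term_len.toNat - 1 ≥ max_pos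
    · rw [if_pos ⟨ht, hx⟩, if_pos hx]
    · rw [if_neg (fun h => hx h.2), if_neg hx]
      rw [List.singleton_append]
      congr 1
  · have hN0 : (term_len - 1).toNat = 0 := by omega
    rw [hN0, if_neg (by omega)]
    simp
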